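-- pv_equiv track=rewrite | github.com/jotavlim4/ZeroToHeroPython | LiP/digitos_impares_pares.py | conta_digitos_impares
-- ===== SOURCE A (Python) =====
-- def conta_digitos_impares(n):
--     digitos_impares = 0
--     digitos_impares_consecutivos = 0
--     r_anterior = -1
--     while n > 0:
--         q = n // 10
--         r_atual = n % 10
--
--         if r_atual % 2 == 1:
--             digitos_impares += 1
--             if r_anterior % 2 == 1 and r_anterior > 0:
--                 digitos_impares_consecutivos += 1
--
--         r_anterior = r_atual
--         n = q
--
--     return digitos_impares, digitos_impares_consecutivos
-- ===== SOURCE B (Python) =====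
-- def conta_digitos_impares(n):
--     if n <= 0:
--         return 0, 0
--     digits = []
--     while n > 0:
--         digits.append(n % 10)
--         n //= 10
--     impares = sum(1 for d in digits if d % 2 == 1)
--     consecutivos = sum(1 for a, b in zip(digits, digits[1:]) if a % 2 == 1 and b % 2 == 1)
--     return impares, consecutivos
-- ===== Notes on version B (the rewrite author's own statement) =====
-- stated objective: simpler
-- what changed: Replaces the single stateful pass with a previous-digit sentinel (r_anterior = -1) by an explicit digit list and two separate comprehension-style passes: one counting odd digits and one zipping the list against its own tail to count adjacent odd pairs.
import Mathlib
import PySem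

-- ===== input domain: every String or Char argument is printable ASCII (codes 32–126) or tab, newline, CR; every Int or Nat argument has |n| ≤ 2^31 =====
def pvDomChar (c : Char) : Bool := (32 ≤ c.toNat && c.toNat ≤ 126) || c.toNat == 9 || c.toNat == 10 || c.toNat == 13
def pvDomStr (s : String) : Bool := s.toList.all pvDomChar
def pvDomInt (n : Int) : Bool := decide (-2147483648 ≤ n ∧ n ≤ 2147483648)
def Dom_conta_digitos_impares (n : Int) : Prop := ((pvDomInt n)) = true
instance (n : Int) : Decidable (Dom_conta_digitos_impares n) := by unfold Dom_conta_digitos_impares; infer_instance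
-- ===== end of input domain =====

-- B replaces A's single stateful pass (previous-digit sentinel r_anterior = -1) by an
-- explicit digit list and two separate passes: a count of odd digits and a zip of the
-- list with its own tail counting adjacent odd pairs. Objective: simpler decomposition.

-- ===== PORT A =====
-- the while loop of A, carrying its three state variables
def contaLoopA (n di dc r : Int) : Int × Int :=
  if h : n > 0 then
    let q := PySem.Int.floordiv n 10
    let r_atual := PySem.Int.mod n 10
    let di' := if PySem.Int.mod r_atual 2 = 1 then di + 1 else di
    let dc' := if PySem.Int.mod r_atual 2 = 1 ∧ (PySem.Int.mod r 2 = 1 ∧ r > 0) then dc + 1 else dc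
    contaLoopA q di' dc' r_atual
  else (di, dc)
termination_by n.toNat
decreasing_by
  have h10 : PySem.Int.floordiv n 10 = n / 10 := PySem.Int.floordiv_eq_ediv_of_pos (by omega)
  have := Int.ediv_add_emod n 10
  have h1 := Int.emod_nonneg n (by norm_num : (10:Int) ≠ 0)
  have h2 := Int.emod_lt_of_pos n (by norm_num : (0:Int) < 10)
  omega

def conta_digitos_impares (n : Int) : Int × Int := contaLoopA n 0 0 (-1)

-- ===== PORT B =====
-- the digit-collecting while loop of B (digits.append, n //= 10)
def digitsLoopB (n : Int) (acc : List Int) : List Int :=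
  if h : n > 0 then digitsLoopB (PySem.Int.floordiv n 10) (acc ++ [PySem.Int.mod n 10])
  else acc
termination_by n.toNat
decreasing_by
  have h10 : PySem.Int.floordiv n 10 = n / 10 := PySem.Int.floordiv_eq_ediv_of_pos (by omega)
  have := Int.ediv_add_emod n 10
  have h1 := Int.emod_nonneg n (by norm_num : (10:Int) ≠ 0)
  have h2 := Int.emod_lt_of_pos n (by norm_num : (0:Int) < 10)
  omega

def conta_digitos_impares_alt (n : Int) : Int × Int :=
  if n ≤ 0 then (0, 0)
  else
    let digits := digitsLoopB n []
    -- sum(1 for d in digits if d % 2 == 1)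
    let impares := digits.foldl (fun s d => if PySem.Int.mod d 2 = 1 then s + 1 else s) 0
    -- zip(digits, digits[1:]); digits[1:] = drop 1 (exact for this nonneg slice)
    let consecutivos := (digits.zip (digits.drop 1)).foldl
      (fun s p => if PySem.Int.mod p.1 2 = 1 ∧ PySem.Int.mod p.2 2 = 1 then s + 1 else s) 0
    (impares, consecutivos)

-- ===== PRECONDITION & SPEC =====
def Spec_conta_digitos_impares (n : Int) (out : Int × Int) : Prop := out = conta_digitos_impares_alt n
instance (n : Int) (out : Int × Int) : Decidable (Spec_conta_digitos_impares n out) := by unfold Spec_conta_digitos_impares; infer_instance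

-- ===== CLAIM (what is proved, stated in full; the proofs are below) =====
def Claim_equal_conta_digitos_impares : Prop := ∀ (n : Int), Dom_conta_digitos_impares n → Spec_conta_digitos_impares n (conta_digitos_impares n)

-- ===== LEMMAS AND PROOFS =====

-- little-endian digit list of n (proof-side characterisation of digitsLoopB)
def pvDigits (n : Int) : List Int :=
  if h : n > 0 then PySem.Int.mod n 10 :: pvDigits (PySem.Int.floordiv n 10)
  else []
termination_by n.toNat
decreasing_by
  have h10 : PySem.Int.floordiv n 10 = n / 10 := PySem.Int.floordiv_eq_ediv_of_pos (by omega)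
  have := Int.ediv_add_emod n 10
  have h1 := Int.emod_nonneg n (by norm_num : (10:Int) ≠ 0)
  have h2 := Int.emod_lt_of_pos n (by norm_num : (0:Int) < 10)
  omega

-- count of odd entries
def pvOC : List Int → Int
  | [] => 0
  | d :: t => (if PySem.Int.mod d 2 = 1 then 1 else 0) + pvOC t

-- A's pair count given previous digit r
def pvPC (r : Int) : List Int → Int
  | [] => 0
  | d :: t => (if PySem.Int.mod d 2 = 1 ∧ (PySem.Int.mod r 2 = 1 ∧ r > 0) then 1 else 0) + pvPC d t

-- adjacent odd-pair count (B's zip view)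
def pvPZ : List Int → Int
  | [] => 0
  | [_] => 0
  | a :: b :: t => (if PySem.Int.mod a 2 = 1 ∧ PySem.Int.mod b 2 = 1 then 1 else 0) + pvPZ (b :: t)

theorem digitsLoopB_eq (n : Int) : ∀ acc, digitsLoopB n acc = acc ++ pvDigits n := by
  induction n using pvDigits.induct with
  | case1 n h ih =>
      intro acc
      rw [digitsLoopB, pvDigits, dif_pos h, dif_pos h, ih]
      simp
  | case2 n h =>
      intro acc
      rw [digitsLoopB, pvDigits, dif_neg h, dif_neg h]
      simp

theorem contaLoopA_eq (n : Int) : ∀ di dc r,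
    contaLoopA n di dc r = (di + pvOC (pvDigits n), dc + pvPC r (pvDigits n)) := by
  induction n using pvDigits.induct with
  | case1 n h ih =>
      intro di dc r
      rw [contaLoopA, pvDigits, dif_pos h, dif_pos h, ih]
      simp only [pvOC, pvPC, Prod.mk.injEq]
      constructor <;> (split_ifs <;> ring)
  | case2 n h =>
      intro di dc r
      rw [contaLoopA, pvDigits, dif_neg h, dif_neg h]
      simp [pvOC, pvPC]

theorem pvDigits_nonneg (n : Int) : ∀ d ∈ pvDigits n, 0 ≤ d := by
  induction n using pvDigits.induct with
  | case1 n h ih =>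
      rw [pvDigits, dif_pos h]
      intro d hd
      rcases List.mem_cons.mp hd with rfl | hd
      · have := PySem.Int.mod_eq_emod_of_pos (a := n) (b := 10) (by norm_num)
        have := Int.emod_nonneg n (by norm_num : (10:Int) ≠ 0)
        omega
      · exact ih d hd
  | case2 n h =>
      rw [pvDigits, dif_neg h]; intro d hd; simp at hd

theorem pvPC_eq_pvPZ_cons (l : List Int) : (∀ d ∈ l, 0 ≤ d) →
    ∀ r, 0 ≤ r → pvPC r l = pvPZ (r :: l) := by
  induction l with
  | nil => intro _ r _; simp [pvPC, pvPZ]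
  | cons d t ih =>
      intro hl r hr
      have hd : 0 ≤ d := hl d (List.mem_cons_self ..)
      have hm := PySem.Int.mod_eq_emod_of_pos (a := r) (b := 2) (by norm_num)
      have hrpos : PySem.Int.mod r 2 = 1 → 0 < r := by rw [hm]; omega
      simp only [pvPC, pvPZ, ih (fun x hx => hl x (List.mem_cons_of_mem _ hx)) d hd]
      congr 1
      split_ifs with h1 h2 h2
      · rfl
      · exact absurd ⟨h1.2.1, h1.1⟩ h2
      · exact absurd ⟨h2.2, h2.1, hrpos h2.1⟩ h1
      · rfl

theorem pvPC_neg_one (l : List Int) (hl : ∀ d ∈ l, 0 ≤ d) : pvPC (-1) l = pvPZ l := by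
  cases l with
  | nil => simp [pvPC, pvPZ]
  | cons d t =>
      have hd : 0 ≤ d := hl d (List.mem_cons_self ..)
      simp only [pvPC]
      rw [pvPC_eq_pvPZ_cons t (fun x hx => hl x (List.mem_cons_of_mem _ hx)) d hd]
      norm_num

theorem foldl_oc (l : List Int) : ∀ s,
    l.foldl (fun s d => if PySem.Int.mod d 2 = 1 then s + 1 else s) s = s + pvOC l := by
  induction l with
  | nil => intro s; simp [pvOC]
  | cons d t ih =>
      intro s
      simp only [List.foldl, pvOC, ih]
      split_ifs <;> ring

theorem foldl_pz (l : List Int) : ∀ s,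
    (l.zip (l.drop 1)).foldl
      (fun s p => if PySem.Int.mod p.1 2 = 1 ∧ PySem.Int.mod p.2 2 = 1 then s + 1 else s) s
      = s + pvPZ l := by
  induction l with
  | nil => intro s; simp [pvPZ]
  | cons a t ih =>
      intro s
      cases t with
      | nil => simp [pvPZ]
      | cons b u =>
          rw [show (b :: u).drop 1 = u from rfl] at ih
          simp only [List.zip] at ih
          simp only [List.drop, List.zip, List.zipWith, List.foldl, pvPZ]
          rw [ih]
          split_ifs <;> ring

-- ===== VERDICT (by name: the statement is the Claim_ definition above) =====
theorem conta_digitos_impares_spec : Claim_equal_conta_digitos_impares := by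
  intro n _
  unfold Spec_conta_digitos_impares conta_digitos_impares conta_digitos_impares_alt
  by_cases h : n ≤ 0
  · rw [if_pos h, contaLoopA, dif_neg (by omega)]
  · rw [if_neg h]
    have hd := pvDigits_nonneg n
    rw [contaLoopA_eq, digitsLoopB_eq]
    simp only [List.nil_append]
    rw [foldl_oc, foldl_pz, pvPC_neg_one _ hd]
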